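-- pv_equiv track=rewrite | github.com/TAMUsquirrel/ProperSentenceCase | psc_functions.py | title_triwise_front_capper
-- ===== SOURCE A (Python) =====
-- from itertools import tee
--
-- List_of_Single_Word_Titles = ['agent', 'brother', 'cantor', 'captain', 'chairperson', 'chancellor', 'chef', 'chief', 'commissioner', 'darth', 'dame', 'dean', 'deputy', 'detective', 'director', 'doctor', 'father', 'governor', 'judge', 'king', 'queen', 'prince', 'princess', 'czar', 'lady', 'laird', 'lieutenant', 'lord', 'madame', 'master', 'miss', 'officer', 'pastor', 'president', 'principal', 'professor', 'provost', 'rabbi', 'rector', 'regent', 'reverend', 'saint', 'sensei', 'sheriff', 'sister', 'student', 'trainer', 'warden']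
--
-- def triwise(iterable):
--     a, b = tee(iterable)
--     a, c = tee(iterable)
--     next(b, None)
--     next(c, None)
--     next(c, None)
--     return zip(a, b, c)
--
-- def title_triwise_front_capper(NLP_Dict, input_text):
--     output_document = ''
--     for sentence in NLP_Dict:
--         for word1, word2, word3 in triwise(sentence):
--             word1_start, word1_end = int(word1['start_char']), int(word1['end_char'])
--             word1_location = input_text[word1_start:word1_end]
--             space_between_word1_word2 = (int(word2['start_char'])-int(word1['end_char']))*' '
--             if word1['text'] in List_of_Single_Word_Titles and word2['text'] in ['of'] and word3['upos'] in ['PROPN', 'NOUN']: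
--                 output_document += word1_location.title()+(space_between_word1_word2)
--             else:
--                 output_document += word1_location+(space_between_word1_word2)
--         else:
--             try:
--                 output_document += input_text[int(sentence[-2]['start_char']):int(sentence[-2]['end_char'])]
--             except IndexError:
--                 continue
--             try:
--                 output_document += ((int(sentence[-1]['start_char'])-int(sentence[-2]['end_char']))*' ')
--             except IndexError:
--                 continue
--             try:
--                 output_document += input_text[int(sentence[-1]['start_char']):int(sentence[-1]['end_char'])]+' '
--             except IndexError:
--                 continue
--     else:
--         output_document += ' '
--     return output_document
-- ===== SOURCE B (Python) =====
-- List_of_Single_Word_Titles = ['agent', 'brother', 'cantor', 'captain', 'chairperson', 'chancellor', 'chef', 'chief', 'commissioner', 'darth', 'dame', 'dean', 'deputy', 'detective', 'director', 'doctor', 'father', 'governor', 'judge', 'king', 'queen', 'prince', 'princess', 'czar', 'lady', 'laird', 'lieutenant', 'lord', 'madame', 'master', 'miss', 'officer', 'pastor', 'president', 'principal', 'professor', 'provost', 'rabbi', 'rector', 'regent', 'reverend', 'saint', 'sensei', 'sheriff', 'sister', 'student', 'trainer', 'warden']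
--
-- def title_triwise_front_capper(NLP_Dict, input_text):
--     pieces = []
--     for sentence in NLP_Dict:
--         n = len(sentence)
--         if n < 2:
--             continue  # A's tail block hits IndexError and skips such sentences
--         for i, word in enumerate(sentence):
--             text = input_text[int(word['start_char']):int(word['end_char'])]
--             if (i <= n - 3
--                     and word['text'] in List_of_Single_Word_Titles
--                     and sentence[i + 1]['text'] == 'of'
--                     and sentence[i + 2]['upos'] in ('PROPN', 'NOUN')):
--                 text = text.title()
--             if i < n - 1:
--                 sep = ' ' * (int(sentence[i + 1]['start_char']) - int(word['end_char']))
--             else: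
--                 sep = ' '
--             pieces.append(text + sep)
--     pieces.append(' ')
--     return ''.join(pieces)
-- ===== Notes on version B (the rewrite author's own statement) =====
-- stated objective: simpler
-- what changed: Replaces the tee-based triwise window plus the separate try/except for-else tail block with one uniform index loop over every word of the sentence (skipping sentences of fewer than 2 words up front), collecting pieces in a list joined once at the end.
import Mathlib
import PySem

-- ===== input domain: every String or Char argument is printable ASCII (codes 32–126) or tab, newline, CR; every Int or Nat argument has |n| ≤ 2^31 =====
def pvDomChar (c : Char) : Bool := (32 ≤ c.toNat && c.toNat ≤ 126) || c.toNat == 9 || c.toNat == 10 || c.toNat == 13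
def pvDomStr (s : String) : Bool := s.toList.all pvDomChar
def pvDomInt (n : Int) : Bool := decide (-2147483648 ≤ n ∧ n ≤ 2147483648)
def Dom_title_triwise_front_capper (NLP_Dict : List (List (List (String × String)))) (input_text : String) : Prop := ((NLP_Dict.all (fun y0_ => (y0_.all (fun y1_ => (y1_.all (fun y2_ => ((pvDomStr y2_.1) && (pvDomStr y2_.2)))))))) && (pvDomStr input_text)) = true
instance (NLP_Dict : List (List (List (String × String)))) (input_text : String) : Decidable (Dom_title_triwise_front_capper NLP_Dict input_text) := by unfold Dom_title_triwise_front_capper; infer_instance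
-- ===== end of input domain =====

-- B replaces A's tee-based triwise window plus the separate try/except tail block by one uniform
-- index loop over all words of each sentence, collecting the pieces in a list joined at the end
-- (objective: simpler; same return value wherever A returns normally).

-- ===== shared word-level helpers (both Pythons read the same dicts, ints, slices, title()) =====
-- word['k'] on the word dict (assoc list, first match = the dict lookup)
def pvGetS (w : List (String × String)) (k : String) : Option String :=
  (PySem.Dict.mk w).get? k
-- int(word['k']); the getD 0 is reached only outside Pre_ (KeyError/ValueError there)
def pvIntAt (w : List (String × String)) (k : String) : Int :=
  ((pvGetS w k).bind PySem.Int.ofStr?).getD 0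
-- word['text'] / word['upos']; getD "" reached only outside Pre_
def pvTextD (w : List (String × String)) : String := (pvGetS w "text").getD ""
def pvUposD (w : List (String × String)) : String := (pvGetS w "upos").getD ""
-- input_text[a:b]
def pvSlice (t : List Char) (a b : Int) : List Char := PySem.List.slice t (some a) (some b)
-- n*' '  (empty for n ≤ 0, as in Python)
def pvSpaces (n : Int) : List Char := List.replicate n.toNat ' '
-- str.title(), hand-ported (PySem has no title): exact on ASCII, where 'cased' = letter;
-- the flag is 'previous character was a letter'
def pvTitleGo : Bool → List Char → List Char
  | _, [] => []
  | prev, c :: rest =>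
      (if PySem.Chars.isalpha c then
         (if prev then PySem.Chars.lowerChar c else PySem.Chars.upperChar c)
       else c) :: pvTitleGo (PySem.Chars.isalpha c) rest
def pvTitle (cs : List Char) : List Char := pvTitleGo false cs

def pvTitles : List String := ["agent", "brother", "cantor", "captain", "chairperson", "chancellor", "chef", "chief", "commissioner", "darth", "dame", "dean", "deputy", "detective", "director", "doctor", "father", "governor", "judge", "king", "queen", "prince", "princess", "czar", "lady", "laird", "lieutenant", "lord", "madame", "master", "miss", "officer", "pastor", "president", "principal", "professor", "provost", "rabbi", "rector", "regent", "reverend", "saint", "sensei", "sheriff", "sister", "student", "trainer", "warden"]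

-- ===== PORT A =====
-- triwise(sentence) = zip(sentence, sentence[1:], sentence[2:])
def pvTriples (s : List (List (String × String))) :
    List ((List (String × String) × List (String × String)) × List (String × String)) :=
  (s.zip s.tail).zip s.tail.tail

-- one iteration of A's triwise loop body
def pvPieceA (t : List Char)
    (tr : (List (String × String) × List (String × String)) × List (String × String)) : List Char :=
  if pvTitles.contains (pvTextD tr.1.1) && (["of"] : List String).contains (pvTextD tr.1.2)
       && (["PROPN", "NOUN"] : List String).contains (pvUposD tr.2)
  then pvTitle (pvSlice t (pvIntAt tr.1.1 "start_char") (pvIntAt tr.1.1 "end_char"))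
         ++ pvSpaces (pvIntAt tr.1.2 "start_char" - pvIntAt tr.1.1 "end_char")
  else pvSlice t (pvIntAt tr.1.1 "start_char") (pvIntAt tr.1.1 "end_char")
         ++ pvSpaces (pvIntAt tr.1.2 "start_char" - pvIntAt tr.1.1 "end_char")

-- A's for-else tail: sentence[-2]/sentence[-1] accesses; IndexError (len < 2) → continue ([] here)
def pvTailA (t : List Char) (s : List (List (String × String))) : List Char :=
  match PySem.List.pyGet? s (-2 : Int), PySem.List.pyGet? s (-1 : Int) with
  | some wm2, some wm1 =>
      pvSlice t (pvIntAt wm2 "start_char") (pvIntAt wm2 "end_char")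
        ++ pvSpaces (pvIntAt wm1 "start_char" - pvIntAt wm2 "end_char")
        ++ pvSlice t (pvIntAt wm1 "start_char") (pvIntAt wm1 "end_char") ++ [' ']
  | _, _ => []

def title_triwise_front_capper (NLP_Dict : List (List (List (String × String)))) (input_text : String) : String :=
  let t := input_text.toList
  String.ofList
    ((NLP_Dict.foldl
        (fun acc s => ((pvTriples s).foldl (fun a tr => a ++ pvPieceA t tr) acc) ++ pvTailA t s)
        []) ++ [' '])

-- ===== PORT B =====
-- one iteration of B's index loop: the piece text + sep appended for word i of sentence s
def pvPieceB (t : List Char) (s : List (List (String × String))) (i : Int)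
    (w : List (String × String)) : List Char :=
  (if decide (i ≤ (s.length : Int) - 3) && pvTitles.contains (pvTextD w)
        && (pvTextD (PySem.List.pyGetD s (i + 1) []) == "of")
        && (["PROPN", "NOUN"] : List String).contains (pvUposD (PySem.List.pyGetD s (i + 2) []))
   then pvTitle (pvSlice t (pvIntAt w "start_char") (pvIntAt w "end_char"))
   else pvSlice t (pvIntAt w "start_char") (pvIntAt w "end_char"))
  ++ (if decide (i < (s.length : Int) - 1) then
        pvSpaces (pvIntAt (PySem.List.pyGetD s (i + 1) []) "start_char" - pvIntAt w "end_char")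
      else [' '])

def title_triwise_front_capper_alt (NLP_Dict : List (List (List (String × String)))) (input_text : String) : String :=
  let t := input_text.toList
  let pieces := NLP_Dict.foldl
    (fun ps s =>
      if s.length < 2 then ps
      else (PySem.List.enumerate s).foldl (fun ps2 iw => ps2 ++ [pvPieceB t s iw.1 iw.2]) ps)
    ([] : List (List Char))
  String.ofList (pieces ++ [[' ']]).flatten

-- ===== PRECONDITION & SPEC =====
-- Pre_ = exactly the inputs where the Python A returns normally: in every sentence of ≥ 2 words all
-- words carry int-parseable 'start_char'/'end_char' (else KeyError/ValueError), and following A's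
-- short-circuit the 'text'/'upos' keys needed by the title test exist; sentences of < 2 words are
-- skipped by A's caught IndexError and need nothing.
def pvIntOk (w : List (String × String)) (k : String) : Bool :=
  ((pvGetS w k).bind PySem.Int.ofStr?).isSome
def Pre_title_triwise_front_capper (NLP_Dict : List (List (List (String × String)))) (input_text : String) : Prop :=
  ∀ s ∈ NLP_Dict, 2 ≤ s.length →
    (∀ w ∈ s, pvIntOk w "start_char" ∧ pvIntOk w "end_char") ∧
    (∀ i : Nat, i < s.length - 2 →
      (pvGetS (s.getD i []) "text").isSome ∧
      (pvTextD (s.getD i []) ∈ pvTitles →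
        (pvGetS (s.getD (i + 1) []) "text").isSome ∧
        (pvTextD (s.getD (i + 1) []) = "of" → (pvGetS (s.getD (i + 2) []) "upos").isSome)))
instance (NLP_Dict : List (List (List (String × String)))) (input_text : String) : Decidable (Pre_title_triwise_front_capper NLP_Dict input_text) := by unfold Pre_title_triwise_front_capper; infer_instance

def pvWitness_title_triwise_front_capper : (List (List (List (String × String)))) × String :=
  ([[[("start_char", "0"), ("end_char", "4"), ("text", "king")],
     [("start_char", "5"), ("end_char", "7"), ("text", "of")],
     [("start_char", "8"), ("end_char", "13"), ("upos", "PROPN")]]],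
   "king of spain")

def Spec_title_triwise_front_capper (NLP_Dict : List (List (List (String × String)))) (input_text : String) (out : String) : Prop := out = title_triwise_front_capper_alt NLP_Dict input_text
instance (NLP_Dict : List (List (List (String × String)))) (input_text : String) (out : String) : Decidable (Spec_title_triwise_front_capper NLP_Dict input_text out) := by unfold Spec_title_triwise_front_capper; infer_instance

-- ===== CLAIM (what is proved, stated in full; the proofs are below) =====
def Claim_equal_title_triwise_front_capper : Prop := ∀ (NLP_Dict : List (List (List (String × String)))) (input_text : String), Dom_title_triwise_front_capper NLP_Dict input_text → Pre_title_triwise_front_capper NLP_Dict input_text → Spec_title_triwise_front_capper NLP_Dict input_text (title_triwise_front_capper NLP_Dict input_text)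

-- ===== LEMMAS AND PROOFS =====
-- (the two ports agree on ALL inputs, so none of the proofs below use Dom_ or Pre_)

-- the characters A's body contributes for one sentence
def pvSentA (t : List Char) (s : List (List (String × String))) : List Char :=
  (pvTriples s).flatMap (pvPieceA t) ++ pvTailA t s
-- the pieces B's body contributes for one sentence
def pvSentB (t : List Char) (s : List (List (String × String))) : List (List Char) :=
  if s.length < 2 then []
  else (PySem.List.enumerate s).map (fun iw => pvPieceB t s iw.1 iw.2)

theorem pvLen_triples (s : List (List (String × String))) :
    (pvTriples s).length = s.length - 2 := by
  simp [pvTriples]; omega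

theorem pvGetElem_triples (s : List (List (String × String))) (i : Nat)
    (h : i < (pvTriples s).length) :
    (pvTriples s)[i] =
      ((s[i]'(by simp [pvLen_triples] at h; omega),
        s[i + 1]'(by simp [pvLen_triples] at h; omega)),
       s[i + 2]'(by simp [pvLen_triples] at h; omega)) := by
  simp [pvTriples, List.getElem_zip, List.getElem_tail]

-- Python 'x in ["of"]' is 'x == "of"'

-- the middle pieces: B's word-i piece is A's triple-i piece when i + 2 < len
theorem pvPieceB_mid (t : List Char) (s : List (List (String × String))) (i : Nat)
    (h : i + 2 < s.length) :
    pvPieceB t s (i : Int) (s[i]'(by omega)) =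
      pvPieceA t ((s[i]'(by omega), s[i + 1]'(by omega)), s[i + 2]'(by omega)) := by
  unfold pvPieceB pvPieceA
  have h1 : ((i : Int) + 1) = ((i + 1 : Nat) : Int) := by push_cast; ring
  have h2 : ((i : Int) + 2) = ((i + 2 : Nat) : Int) := by push_cast; ring
  rw [h1, h2, PySem.List.pyGetD_natCast, PySem.List.pyGetD_natCast,
    List.getD_eq_getElem _ _ (by omega), List.getD_eq_getElem _ _ (by omega)]
  have hd3 : decide ((i : Int) ≤ (s.length : Int) - 3) = true := by
    simp; omega
  have hd1 : decide ((i : Int) < (s.length : Int) - 1) = true := by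
    simp; omega
  rw [hd3, hd1]
  simp only [Bool.true_and]
  split_ifs with hc1 hc2 hc3 <;> simp_all

-- the two tail pieces: A's for-else block is B's last two loop iterations (len ≥ 2)
theorem pvTailA_eq (t : List Char) (s : List (List (String × String))) (h : 2 ≤ s.length) :
    pvTailA t s =
      pvPieceB t s ((s.length - 2 : Nat) : Int) (s[s.length - 2]'(by omega)) ++
        pvPieceB t s ((s.length - 1 : Nat) : Int) (s[s.length - 1]'(by omega)) := by
  unfold pvTailA pvPieceB
  rw [PySem.List.pyGet?_neg_ofNat s 2 (by omega) (by omega),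
    PySem.List.pyGet?_neg_ofNat s 1 (by omega) (by omega)]
  rw [List.getElem?_eq_getElem (by omega), List.getElem?_eq_getElem (by omega)]
  have e1 : ((s.length - 2 : Nat) : Int) + 1 = ((s.length - 1 : Nat) : Int) := by omega
  rw [e1, PySem.List.pyGetD_natCast, List.getD_eq_getElem _ _ (by omega)]
  have hd3 : decide (((s.length - 2 : Nat) : Int) ≤ (s.length : Int) - 3) = false := by
    simp; omega
  have hd3' : decide (((s.length - 1 : Nat) : Int) ≤ (s.length : Int) - 3) = false := by
    simp; omega
  have hd1 : decide (((s.length - 2 : Nat) : Int) < (s.length : Int) - 1) = true := by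
    simp; omega
  have hd1' : decide (((s.length - 1 : Nat) : Int) < (s.length : Int) - 1) = false := by
    simp; omega
  rw [hd3, hd3', hd1, hd1']
  simp [List.append_assoc]

theorem pvSent_eq (t : List Char) (s : List (List (String × String))) :
    pvSentA t s = (pvSentB t s).flatten := by
  by_cases h : s.length < 2
  · have htr : pvTriples s = [] := by
      have : s.tail.tail = [] := by
        rw [← List.length_eq_zero_iff]; simp; omega
      simp [pvTriples, this]
    have htl : pvTailA t s = [] := by
      unfold pvTailA
      have : PySem.List.pyGet? s (-2 : Int) = none := by
        rw [PySem.List.pyGet?_eq_none_iff, PySem.Raise.InRange]; omega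
      rw [this]
    simp [pvSentA, pvSentB, htr, htl, h]
  · have h : 2 ≤ s.length := by omega
    have hmap : (PySem.List.enumerate s).map (fun iw => pvPieceB t s iw.1 iw.2)
        = (pvTriples s).map (pvPieceA t)
          ++ [pvPieceB t s ((s.length - 2 : Nat) : Int) (s[s.length - 2]'(by omega)),
              pvPieceB t s ((s.length - 1 : Nat) : Int) (s[s.length - 1]'(by omega))] := by
      apply List.ext_getElem?
      intro i
      have hlenM : ((pvTriples s).map (pvPieceA t)).length = s.length - 2 := by
        simp [pvLen_triples]
      by_cases hi : i < s.length
      · rw [List.getElem?_eq_getElem (by simp [PySem.List.length_enumerate]; omega)]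
        rw [List.getElem_map, PySem.List.getElem_enumerate s 0 i (by
          rw [PySem.List.length_enumerate]; exact hi)]
        simp only [zero_add]
        rcases lt_trichotomy i (s.length - 2) with hlt | heq | hgt
        · rw [List.getElem?_append_left (by omega), List.getElem?_eq_getElem (by
            simp [pvLen_triples]; omega)]
          rw [List.getElem_map, pvGetElem_triples s i (by rw [pvLen_triples]; omega)]
          exact congrArg some (pvPieceB_mid t s i (by omega))
        · subst heq
          rw [List.getElem?_append_right (by omega), hlenM, Nat.sub_self]
          rfl
        · have hieq : i = s.length - 1 := by omega
          subst hieq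
          rw [List.getElem?_append_right (by omega), hlenM,
            show s.length - 1 - (s.length - 2) = 1 by omega]
          rfl
      · rw [List.getElem?_eq_none (by simp [PySem.List.length_enumerate]; omega),
          List.getElem?_eq_none (by simp [hlenM]; omega)]
    unfold pvSentA pvSentB
    rw [if_neg (by omega), hmap]
    rw [List.flatten_append, List.flatMap_def, pvTailA_eq t s h]
    simp

theorem pvFoldA (t : List Char) (l : List (List (List (String × String)))) (acc : List Char) :
    l.foldl (fun acc s => ((pvTriples s).foldl (fun a tr => a ++ pvPieceA t tr) acc) ++ pvTailA t s) acc
      = acc ++ l.flatMap (pvSentA t) := by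
  induction l generalizing acc with
  | nil => simp
  | cons s rest ih =>
      rw [List.foldl_cons, PySem.List.foldl_append_eq_flatMap, ih]
      simp [pvSentA, List.append_assoc]

theorem pvFoldB (t : List Char) (l : List (List (List (String × String)))) (ps : List (List Char)) :
    l.foldl (fun ps s =>
        if s.length < 2 then ps
        else (PySem.List.enumerate s).foldl (fun ps2 iw => ps2 ++ [pvPieceB t s iw.1 iw.2]) ps) ps
      = ps ++ l.flatMap (pvSentB t) := by
  induction l generalizing ps with
  | nil => simp
  | cons s rest ih =>
      rw [List.foldl_cons]
      by_cases h : s.length < 2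
      · rw [if_pos h, ih]; simp [pvSentB, h]
      · rw [if_neg h, PySem.List.foldl_append_singleton_eq_map, ih]
        simp [pvSentB, h, List.append_assoc]

-- ===== VERDICT (by name: the statement is the Claim_ definition above) =====
theorem title_triwise_front_capper_spec : Claim_equal_title_triwise_front_capper := by
  intro d txt hD hP
  clear hD hP
  unfold Spec_title_triwise_front_capper title_triwise_front_capper title_triwise_front_capper_alt
  simp only [pvFoldA, pvFoldB]
  simp only [List.nil_append, List.flatten_append, List.flatten_cons, List.flatten_nil,
    List.append_nil]
  congr 1
  congr 1
  induction d with
  | nil => simp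
  | cons s rest ih => simp [pvSent_eq, ih]
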